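-- pv_equiv track=rewrite | github.com/marielebouteiller/course | ConvolutionCyclopeptideSequencing.py | LinearScoring
-- ===== SOURCE A (Python) =====
-- def LinearScoring(peptide, spectrum):
--     theo_spectrum = LinearSpectrum(peptide)
--     count = 0
--     for i in spectrum:
--         if i in theo_spectrum:
--             count += 1
--             theo_spectrum.remove(i)
--     return count
--
-- def LinearSpectrum(peptide):
--     PrefixMass = []
--     PrefixMass.append(0)
--     for i in range(len(peptide)):
--         PrefixMass.append(PrefixMass[-1] + int(peptide[i]))
--     LinearSpectrum = []
--     LinearSpectrum.append(0)
--     for i in range(len(peptide)):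
--         for j in range(i+1, len(peptide)+1):
--             LinearSpectrum.append(PrefixMass[j]-PrefixMass[i])
--     LinearSpectrum.sort()
--     return LinearSpectrum
-- ===== SOURCE B (Python) =====
-- def LinearScoring(peptide, spectrum):
--     # frequency-table formulation: tabulate theoretical sub-peptide masses and
--     # spectrum masses once, then sum per-mass minima (multiset intersection size)
--     prefix = [0]
--     for m in peptide:
--         prefix.append(prefix[-1] + int(m))
--     theo = {0: 1}
--     n = len(peptide)
--     for i in range(n):
--         for j in range(i + 1, n + 1):
--             d = prefix[j] - prefix[i]
--             theo[d] = theo.get(d, 0) + 1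
--     spec = {}
--     for m in spectrum:
--         spec[m] = spec.get(m, 0) + 1
--     return sum(min(c, theo.get(m, 0)) for m, c in spec.items())
-- ===== Notes on version B (the rewrite author's own statement) =====
-- stated objective: faster
-- what changed: Replaces A's build-then-sort theoretical spectrum and its per-element scan with membership-test-and-remove over that list by two frequency tables (a counter of sub-peptide masses built directly from prefix sums, no list and no sort, and a counter of the spectrum) combined wholesale as a sum of per-mass minima.
import Mathlib
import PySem

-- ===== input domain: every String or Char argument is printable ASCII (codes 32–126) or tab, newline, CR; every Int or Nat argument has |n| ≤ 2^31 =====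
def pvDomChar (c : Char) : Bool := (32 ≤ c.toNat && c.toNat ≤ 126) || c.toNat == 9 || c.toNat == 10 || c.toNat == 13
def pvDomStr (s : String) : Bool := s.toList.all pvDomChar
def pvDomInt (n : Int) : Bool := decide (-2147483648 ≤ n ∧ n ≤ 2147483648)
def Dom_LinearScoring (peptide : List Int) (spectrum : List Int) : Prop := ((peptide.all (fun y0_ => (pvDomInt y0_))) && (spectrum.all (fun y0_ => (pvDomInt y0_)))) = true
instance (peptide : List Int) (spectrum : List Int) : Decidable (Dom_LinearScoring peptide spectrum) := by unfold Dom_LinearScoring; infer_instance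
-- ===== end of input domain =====

-- B replaces A's element-by-element scan (membership test + remove on the theoretical-spectrum list,
-- after building and sorting it) by two frequency tables built once and combined wholesale:
-- a counter of the sub-peptide masses (no intermediate list, no sort) and a counter of the spectrum,
-- returning the sum of per-mass minima (the multiset-intersection size). Objective: faster (measured).


-- ===== PORT A =====
-- LinearSpectrum(peptide): prefix masses, all contiguous sub-sums plus 0, sorted
def LinearSpectrumA (peptide : List Int) : List Int :=
  let n : Int := peptide.length
  let pm : List Int := (PySem.List.pyRange 0 n 1).foldl
    (fun pm i => pm ++ [PySem.List.pyGetD pm (-1) 0 + PySem.List.pyGetD peptide i 0]) [0]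
  let ls : List Int := (PySem.List.pyRange 0 n 1).foldl
    (fun ls i => (PySem.List.pyRange (i + 1) (n + 1) 1).foldl
      (fun ls j => ls ++ [PySem.List.pyGetD pm j 0 - PySem.List.pyGetD pm i 0]) ls) [0]
  PySem.List.sorted ls (fun x => x) false

def LinearScoring (peptide : List Int) (spectrum : List Int) : Int :=
  let theo := LinearSpectrumA peptide
  (spectrum.foldl
    (fun (st : Int × List Int) i =>
      if i ∈ st.2 then (st.1 + 1, (PySem.List.remove? st.2 i).getD st.2) else st)
    (0, theo)).1

-- ===== PORT B =====
def LinearScoring_alt (peptide : List Int) (spectrum : List Int) : Int :=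
  let pfx : List Int := peptide.foldl (fun pm m => pm ++ [PySem.List.pyGetD pm (-1) 0 + m]) [0]
  let n : Int := peptide.length
  let theo : PySem.Dict Int Int := (PySem.List.pyRange 0 n 1).foldl
    (fun d i => (PySem.List.pyRange (i + 1) (n + 1) 1).foldl
      (fun d j =>
        let df := PySem.List.pyGetD pfx j 0 - PySem.List.pyGetD pfx i 0
        d.insert df (d.getD df 0 + 1)) d)
    ((PySem.Dict.empty).insert 0 1)
  let spec : PySem.Dict Int Int := spectrum.foldl (fun d m => d.insert m (d.getD m 0 + 1)) PySem.Dict.empty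
  (spec.items.map (fun p => min p.2 (theo.getD p.1 0))).sum

-- ===== PRECONDITION & SPEC =====
def Spec_LinearScoring (peptide : List Int) (spectrum : List Int) (out : Int) : Prop := out = LinearScoring_alt peptide spectrum
instance (peptide : List Int) (spectrum : List Int) (out : Int) : Decidable (Spec_LinearScoring peptide spectrum out) := by unfold Spec_LinearScoring; infer_instance

-- ===== CLAIM (what is proved, stated in full; the proofs are below) =====
def Claim_equal_LinearScoring : Prop := ∀ (peptide : List Int) (spectrum : List Int), Dom_LinearScoring peptide spectrum → Spec_LinearScoring peptide spectrum (LinearScoring peptide spectrum)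

-- ===== LEMMAS AND PROOFS =====

-- A's scan (membership test, count, remove first occurrence) computes the multiset-intersection size
theorem scan_eq (sp : List Int) : ∀ (theo : List Int) (c : Int),
    (sp.foldl
      (fun (st : Int × List Int) i =>
        if i ∈ st.2 then (st.1 + 1, (PySem.List.remove? st.2 i).getD st.2) else st)
      (c, theo)).1
    = c + ((Multiset.card ((↑sp : Multiset Int) ∩ (↑theo : Multiset Int)) : Nat) : Int) := by
  induction sp with
  | nil => intro theo c; simp
  | cons i rest ih =>
    intro theo c
    by_cases h : i ∈ theo
    · rw [List.foldl_cons]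
      simp only [h, if_pos]
      rw [PySem.List.remove?_eq_some_erase theo i h, Option.getD_some, ih]
      have hcoe : ((i :: rest : List Int) : Multiset Int) = i ::ₘ (↑rest : Multiset Int) := rfl
      rw [hcoe, Multiset.cons_inter_of_pos _ (by simpa using h)]
      have : ((theo.erase i : List Int) : Multiset Int) = (↑theo : Multiset Int).erase i :=
        Eq.symm (Multiset.coe_erase theo i)
      rw [← this]
      simp
      omega
    · rw [List.foldl_cons]
      simp only [h, if_neg, not_false_iff]
      rw [ih]
      have hcoe : ((i :: rest : List Int) : Multiset Int) = i ::ₘ (↑rest : Multiset Int) := rfl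
      rw [hcoe, Multiset.cons_inter_of_neg _ (by simpa using h)]

theorem toFinset_ofList (xs : List Int) : (PySem.Set.ofList xs).toFinset = xs.toFinset := by
  ext a; simp [PySem.Set.mem_ofList]

-- B's per-mass-minimum sum over the spectrum's distinct masses is the multiset-intersection size
theorem sum_min_eq (xs ys : List Int) :
    ((PySem.Set.ofList xs).map (fun m => min ((xs.count m : Int)) ((ys.count m : Int)))).sum
    = ((Multiset.card ((↑xs : Multiset Int) ∩ (↑ys : Multiset Int)) : Nat) : Int) := by
  have hnd : (PySem.Set.ofList xs).Nodup := PySem.Set.nodup_ofList xs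
  have h1 : ((PySem.Set.ofList xs).map (fun m => min ((xs.count m : Int)) ((ys.count m : Int)))).sum
      = ∑ m ∈ xs.toFinset, min ((xs.count m : Int)) ((ys.count m : Int)) := by
    rw [← List.sum_toFinset _ hnd, toFinset_ofList]
  rw [h1]
  have h2 : ∀ m : Int, min ((xs.count m : Int)) ((ys.count m : Int))
      = ((((↑xs : Multiset Int) ∩ (↑ys : Multiset Int)).count m : Nat) : Int) := by
    intro m
    rw [Multiset.count_inter]
    push_cast
    simp [Multiset.coe_count]
  simp only [h2]
  rw [← Nat.cast_sum]
  congr 1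
  rw [← Multiset.toFinset_sum_count_eq ((↑xs : Multiset Int) ∩ (↑ys : Multiset Int))]
  refine (Finset.sum_subset ?_ ?_).symm
  · intro a ha
    simp only [Multiset.mem_toFinset] at ha ⊢
    simpa using Multiset.mem_of_le Multiset.inter_le_left ha
  · intro a _ ha
    simp only [Multiset.mem_toFinset] at ha
    exact Multiset.count_eq_zero_of_notMem ha

-- a nested fold over two index ranges is a flat fold over the flattened keyed list
theorem foldl_nested {β : Type} (outer : List Int) (g : Int → List Int) (key : Int → Int → Int)
    (step : β → Int → β) : ∀ (init : β),
    outer.foldl (fun s i => (g i).foldl (fun s j => step s (key i j)) s) init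
    = ((outer.map (fun i => (g i).map (key i))).flatten).foldl step init := by
  induction outer with
  | nil => intro init; simp
  | cons i rest ih =>
    intro init
    simp only [List.foldl_cons, List.map_cons, List.flatten_cons, List.foldl_append, List.foldl_map]
    exact ih _

-- the flattened list of sub-peptide masses over prefix list pm, for peptide length n
def flatSubs (pm : List Int) (n : Int) : List Int :=
  ((PySem.List.pyRange 0 n 1).map
    (fun i => (PySem.List.pyRange (i + 1) (n + 1) 1).map
      (fun j => PySem.List.pyGetD pm j 0 - PySem.List.pyGetD pm i 0))).flatten

-- A's unsorted theoretical-spectrum list is 0 :: flatSubs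
theorem listA_eq (pm : List Int) (n : Int) :
    (PySem.List.pyRange 0 n 1).foldl
      (fun ls i => (PySem.List.pyRange (i + 1) (n + 1) 1).foldl
        (fun ls j => ls ++ [PySem.List.pyGetD pm j 0 - PySem.List.pyGetD pm i 0]) ls) [0]
    = 0 :: flatSubs pm n := by
  rw [foldl_nested (step := fun (ls : List Int) x => ls ++ [x])]
  rw [PySem.List.foldl_append_singleton_eq_self]
  rfl

-- B's theo counter counts exactly 0 :: flatSubs
theorem theoB_getD (pm : List Int) (n : Int) (v : Int) :
    ((PySem.List.pyRange 0 n 1).foldl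
      (fun d i => (PySem.List.pyRange (i + 1) (n + 1) 1).foldl
        (fun d j =>
          let df := PySem.List.pyGetD pm j 0 - PySem.List.pyGetD pm i 0
          d.insert df (d.getD df 0 + 1)) d)
      (((PySem.Dict.empty : PySem.Dict Int Int)).insert 0 1)).getD v 0
    = (((0 :: flatSubs pm n).count v : Nat) : Int) := by
  rw [foldl_nested (step := fun (d : PySem.Dict Int Int) x => d.insert x (d.getD x 0 + 1))]
  rw [show ((PySem.List.pyRange 0 n 1).map
      (fun i => (PySem.List.pyRange (i + 1) (n + 1) 1).map
        (fun j => PySem.List.pyGetD pm j 0 - PySem.List.pyGetD pm i 0))).flatten = flatSubs pm n from rfl]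
  rw [PySem.Dict.getD_foldl_insert_add_one]
  have h0 : ((PySem.Dict.empty : PySem.Dict Int Int)).insert 0 1 = PySem.Dict.counter [0] := rfl
  rw [h0, PySem.Dict.getD_counter]
  by_cases h : v = 0 <;> simp [List.count_cons, h] <;> omega

-- A's and B's prefix-mass lists coincide
theorem prefix_eq (peptide : List Int) :
    (PySem.List.pyRange 0 (peptide.length : Int) 1).foldl
      (fun pm i => pm ++ [PySem.List.pyGetD pm (-1) 0 + PySem.List.pyGetD peptide i 0]) [0]
    = peptide.foldl (fun pm m => pm ++ [PySem.List.pyGetD pm (-1) 0 + m]) [0] := by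
  have := PySem.List.foldl_pyRange_zero_pyGetD (xs := peptide) (d := 0)
    (f := fun (pm : List Int) m => pm ++ [PySem.List.pyGetD pm (-1) 0 + m]) (init := ([0] : List Int))
  simpa using this

-- ===== VERDICT (by name: the statement is the Claim_ definition above) =====
theorem LinearScoring_spec : Claim_equal_LinearScoring := by
  intro peptide spectrum _
  unfold Spec_LinearScoring LinearScoring LinearScoring_alt LinearSpectrumA
  simp only []
  rw [prefix_eq]
  set pfx := peptide.foldl (fun pm m => pm ++ [PySem.List.pyGetD pm (-1) 0 + m]) [0] with hpfx
  rw [scan_eq]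
  rw [PySem.Dict.foldl_insert_getD_add_one_eq_counter, PySem.Dict.items_counter]
  rw [List.map_map]
  have hb : (fun p : Int × Int => min p.2
        (((PySem.List.pyRange 0 (peptide.length : Int) 1).foldl
          (fun d i => (PySem.List.pyRange (i + 1) ((peptide.length : Int) + 1) 1).foldl
            (fun d j =>
              let df := PySem.List.pyGetD pfx j 0 - PySem.List.pyGetD pfx i 0
              d.insert df (d.getD df 0 + 1)) d)
          (((PySem.Dict.empty : PySem.Dict Int Int)).insert 0 1)).getD p.1 0))
      ∘ (fun k => (k, (spectrum.count k : Int)))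
      = fun m => min ((spectrum.count m : Int)) (((0 :: flatSubs pfx (peptide.length : Int)).count m : Nat) : Int) := by
    funext m
    simp only [Function.comp]
    rw [theoB_getD]
  rw [hb, sum_min_eq]
  rw [listA_eq]
  rw [Multiset.coe_eq_coe.mpr (PySem.List.sorted_perm (0 :: flatSubs pfx (peptide.length : Int)) (fun x : Int => x) false)]
  omega
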